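-- pv_equiv track=rewrite | github.com/EigenDev/simbi | simbi/cli/commands/run/config.py | _get_derived_classes
-- ===== SOURCE A (Python) =====
-- from typing import List, Dict, Any, Optional, Sequence, Tuple, Set
--
-- def _get_derived_classes(
--     graph: Dict[str, Set[str]], base_class: str = "BaseConfig"
-- ) -> Set[str]:
--     """Find all classes that inherit from base_class directly or indirectly"""
--     derived = set()
--
--     def visit(class_name: str) -> None:
--         # Find all classes that directly inherit from this class
--         direct_children = {name for name, bases in graph.items() if class_name in bases}
--         # Add them to our result set
--         derived.update(direct_children)
--         # Recursively visit each child
--         for child in direct_children: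
--             visit(child)
--
--     # Start search from base class
--     visit(base_class)
--     return derived
-- ===== SOURCE B (Python) =====
-- def _get_derived_classes(graph, base_class="BaseConfig"):
--     """Find all classes that inherit from base_class directly or indirectly.
--
--     Different structure from the original: builds the parent->direct-subclasses
--     index once, then a pure recursion returns each node's descendant list
--     (children first, then their descendants), and a single set() at the end
--     collects the distinct names; the original instead threads a mutable set
--     through the recursion and rescans the whole graph on every visit."""
--     children = {}
--     for name, bases in graph.items():
--         for b in bases:
--             children.setdefault(b, []).append(name)
--
--     def descendants(x):
--         kids = children.get(x, [])
--         return kids + [d for k in kids for d in descendants(k)]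
--
--     return set(descendants(base_class))
-- ===== Notes on version B (the rewrite author's own statement) =====
-- stated objective: alternative
-- what changed: B builds the parent-to-children reverse index in one pass, then a pure recursion returns each node's descendant list and one final set() collects the distinct names, instead of A's closure that mutates a shared set and rescans every graph item on each recursive visit.
import Mathlib
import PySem

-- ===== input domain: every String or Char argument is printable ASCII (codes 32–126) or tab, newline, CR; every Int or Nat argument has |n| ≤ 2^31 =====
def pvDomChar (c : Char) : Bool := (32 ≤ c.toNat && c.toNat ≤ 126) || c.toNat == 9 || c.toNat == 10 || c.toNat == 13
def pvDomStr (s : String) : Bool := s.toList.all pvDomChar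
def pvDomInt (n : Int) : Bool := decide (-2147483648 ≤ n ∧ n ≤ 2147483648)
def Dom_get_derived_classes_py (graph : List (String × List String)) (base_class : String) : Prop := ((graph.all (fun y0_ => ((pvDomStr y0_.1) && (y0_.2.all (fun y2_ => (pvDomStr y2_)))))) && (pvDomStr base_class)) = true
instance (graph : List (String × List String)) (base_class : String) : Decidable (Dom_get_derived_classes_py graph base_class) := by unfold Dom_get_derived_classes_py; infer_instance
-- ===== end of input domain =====

-- B builds the parent→direct-subclasses index once and a PURE recursion returns each
-- node's descendant list, collected by one final set(); A threads a mutable set through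
-- the recursion and rescans the whole graph on every visit.
-- Both Pythons return a SET; the ports list its elements in first-discovery order
-- (the same for both; the set value is what Python returns).

-- ===== PORT A =====
-- {name for name, bases in graph.items() if class_name in bases}: dict keys are
-- distinct, so the comprehension's set holds exactly these names (graph order; the
-- final returned set does not depend on Python's set-iteration order).
def pvDirectChildren (graph : List (String × List String)) (class_name : String) : List String :=
  (graph.filter (fun p => p.2.contains class_name)).map Prod.fst

-- the recursive `visit`, threading `derived`; fuel graph.length+1 bounds the
-- recursion depth (on Pre_ inputs every inheritance chain is that short)
def pvVisitA (graph : List (String × List String)) : Nat → PySem.Set String → String → PySem.Set String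
  | 0, derived, _ => derived
  | fuel+1, derived, class_name =>
    let direct_children := pvDirectChildren graph class_name
    let derived := PySem.Set.update derived direct_children
    direct_children.foldl (fun d c => pvVisitA graph fuel d c) derived

def get_derived_classes_py (graph : List (String × List String)) (base_class : String) : List String :=
  pvVisitA graph (graph.length + 1) PySem.Set.empty base_class

-- ===== PORT B =====
-- children = {}; for name, bases in graph.items(): for b in bases: children.setdefault(b, []).append(name)
-- (bases is a Python set: its distinct elements are PySem.Set.ofList of the value list)
def pvChildrenMap (graph : List (String × List String)) : PySem.Dict String (List String) :=
  graph.foldl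
    (fun m p => (PySem.Set.ofList p.2).foldl (fun m b => m.insert b (m.getD b [] ++ [p.1])) m)
    PySem.Dict.empty

-- descendants(x) = kids + [d for k in kids for d in descendants(k)]; pure, no accumulator.
-- Same depth-fuel convention as port A (on Pre_ inputs the recursion is that shallow).
def pvDescend (childrenMap : PySem.Dict String (List String)) : Nat → String → List String
  | 0, _ => []
  | fuel+1, x =>
    let kids := childrenMap.getD x []
    kids ++ kids.flatMap (fun k => pvDescend childrenMap fuel k)

-- return set(descendants(base_class))
def get_derived_classes_py_alt (graph : List (String × List String)) (base_class : String) : List String :=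
  PySem.Set.ofList (pvDescend (pvChildrenMap graph) (graph.length + 1) base_class)

-- ===== PRECONDITION & SPEC =====
-- reachability within k edge-expansions of the derived-from relation (Pre_ only)
def pvGrow (graph : List (String × List String)) (s : List String) : List String :=
  PySem.List.dedup (s ++ s.flatMap (pvDirectChildren graph))

def pvExpand (graph : List (String × List String)) : Nat → List String → List String
  | 0, s => s
  | k+1, s => pvExpand graph k (pvGrow graph s)

-- Pre_ excludes exactly the graphs with an inheritance cycle reachable from
-- base_class: there Python A's `visit` recurses forever (RecursionError).
def Pre_get_derived_classes_py (graph : List (String × List String)) (base_class : String) : Prop :=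
  ∀ x ∈ pvExpand graph graph.length [base_class],
    x ∉ pvExpand graph graph.length (pvDirectChildren graph x)
instance (graph : List (String × List String)) (base_class : String) : Decidable (Pre_get_derived_classes_py graph base_class) := by
  unfold Pre_get_derived_classes_py; infer_instance

def pvWitness_get_derived_classes_py : (List (String × List String)) × String :=
  ([("MhdConfig", ["BaseConfig"]), ("JetConfig", ["MhdConfig"])], "BaseConfig")

def Spec_get_derived_classes_py (graph : List (String × List String)) (base_class : String) (out : List String) : Prop := out = get_derived_classes_py_alt graph base_class
instance (graph : List (String × List String)) (base_class : String) (out : List String) : Decidable (Spec_get_derived_classes_py graph base_class out) := by unfold Spec_get_derived_classes_py; infer_instance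

-- ===== CLAIM (what is proved, stated in full; the proofs are below) =====
def Claim_equal_get_derived_classes_py : Prop := ∀ (graph : List (String × List String)) (base_class : String), Dom_get_derived_classes_py graph base_class → Pre_get_derived_classes_py graph base_class → Spec_get_derived_classes_py graph base_class (get_derived_classes_py graph base_class)

-- ===== LEMMAS AND PROOFS =====

-- folding one (name, bases) row appends `name` to the bucket of x once per occurrence of x
theorem pv_getD_foldl_row (l : List String) (name x : String) :
    ∀ (m : PySem.Dict String (List String)),
      (l.foldl (fun m b => m.insert b (m.getD b [] ++ [name])) m).getD x []
        = m.getD x [] ++ List.replicate (l.count x) name := by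
  induction l with
  | nil => intro m; simp
  | cons b l ih =>
    intro m
    simp only [List.foldl_cons, ih, PySem.Dict.getD_insert, List.count_cons]
    by_cases hbx : x = b
    · subst hbx
      simp [List.append_assoc, ← List.replicate_succ]
    · have hbx' : ¬ (b = x) := fun h => hbx h.symm
      simp [hbx', hbx]

-- the reverse-index bucket of x is exactly A's per-visit scan result
theorem pv_childrenMap_getD (graph : List (String × List String)) (x : String) :
    (pvChildrenMap graph).getD x [] = pvDirectChildren graph x := by
  unfold pvChildrenMap pvDirectChildren
  suffices h : ∀ (g : List (String × List String)) (m : PySem.Dict String (List String)),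
      (g.foldl (fun m p => (PySem.Set.ofList p.2).foldl (fun m b => m.insert b (m.getD b [] ++ [p.1])) m) m).getD x []
        = m.getD x [] ++ (g.filter (fun p => p.2.contains x)).map Prod.fst by
    simpa using h graph PySem.Dict.empty
  intro g
  induction g with
  | nil => intro m; simp
  | cons p g ih =>
    intro m
    simp only [List.foldl_cons, ih, pv_getD_foldl_row]
    have hcount : (PySem.Set.ofList p.2).count x = if x ∈ p.2 then 1 else 0 := by
      by_cases hx : x ∈ p.2
      · rw [List.count_eq_one_of_mem (PySem.Set.nodup_ofList _) ((PySem.Set.mem_ofList _ _).mpr hx)]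
        simp [hx]
      · rw [List.count_eq_zero_of_not_mem (fun h => hx ((PySem.Set.mem_ofList _ _).mp h))]
        simp [hx]
    by_cases hx : x ∈ p.2
    · simp [hx]
    · simp [hx, hcount]

-- Set.update over an appended list is two updates (update = foldl add)
theorem pv_update_append (d : PySem.Set String) (xs ys : List String) :
    PySem.Set.update d (xs ++ ys) = PySem.Set.update (PySem.Set.update d xs) ys := by
  simp [PySem.Set.update, List.foldl_append]

-- folding "update by g k" over ks is one update by the flattened lists
theorem pv_foldl_update_flatMap (g : String → List String) (ks : List String) :
    ∀ (d : PySem.Set String),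
      ks.foldl (fun d k => PySem.Set.update d (g k)) d = PySem.Set.update d (ks.flatMap g) := by
  induction ks with
  | nil => intro d; simp [PySem.Set.update]
  | cons k ks ih => intro d; simp [List.flatMap_cons, pv_update_append, ih]

-- A's accumulator-threading visit is one update by B's pure descendant list
theorem pv_visit_eq_update (graph : List (String × List String)) :
    ∀ (fuel : Nat) (d : PySem.Set String) (x : String),
      pvVisitA graph fuel d x
        = PySem.Set.update d (pvDescend (pvChildrenMap graph) fuel x) := by
  intro fuel
  induction fuel with
  | zero => intro d x; simp [pvVisitA, pvDescend, PySem.Set.update]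
  | succ f ih =>
    intro d x
    simp only [pvVisitA, pvDescend, pv_childrenMap_getD]
    simp only [ih, pv_foldl_update_flatMap, ← pv_update_append]

-- ===== VERDICT (by name: the statement is the Claim_ definition above) =====
theorem get_derived_classes_py_spec : Claim_equal_get_derived_classes_py := by
  intro graph base_class _ _
  unfold Spec_get_derived_classes_py get_derived_classes_py get_derived_classes_py_alt
  rw [pv_visit_eq_update]
  simp [PySem.Set.update, PySem.Set.ofList_eq_foldl, PySem.Set.empty]
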